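-- pv_equiv track=rewrite | github.com/SynKolbasyn/School | Lesson_06_09_2023/src/Task_1.py | solution
-- ===== SOURCE A (Python) =====
-- def solution(array: list[int, ...]) -> tuple[int, int]:
--     maximum = min(array)
--     odd_count = 0
--     for i in array:
--         if i % 2 == 0 and i > maximum:
--             maximum = i
--         if i % 2 == 1 and i < 0:
--             odd_count += 1
--     return maximum, odd_count
-- ===== SOURCE B (Python) =====
-- def solution(array: list[int, ...]) -> tuple[int, int]:
--     s = sorted(array)
--     maximum = s[0]
--     for v in reversed(s):
--         if v % 2 == 0:
--             if v > maximum: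
--                 maximum = v
--             break
--     odd_count = 0
--     for v in s:
--         if v >= 0:
--             break
--         if v % 2 == 1:
--             odd_count += 1
--     return maximum, odd_count
-- ===== Notes on version B (the rewrite author's own statement) =====
-- stated objective: alternative
-- what changed: B sorts the array first and exploits the order: the max even is the first even met scanning the sorted list from the right (one early-exit scan), and negative odds are counted in the negative prefix with an early break at the first non-negative element, instead of A's single fused pass with two accumulators.
import Mathlib
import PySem

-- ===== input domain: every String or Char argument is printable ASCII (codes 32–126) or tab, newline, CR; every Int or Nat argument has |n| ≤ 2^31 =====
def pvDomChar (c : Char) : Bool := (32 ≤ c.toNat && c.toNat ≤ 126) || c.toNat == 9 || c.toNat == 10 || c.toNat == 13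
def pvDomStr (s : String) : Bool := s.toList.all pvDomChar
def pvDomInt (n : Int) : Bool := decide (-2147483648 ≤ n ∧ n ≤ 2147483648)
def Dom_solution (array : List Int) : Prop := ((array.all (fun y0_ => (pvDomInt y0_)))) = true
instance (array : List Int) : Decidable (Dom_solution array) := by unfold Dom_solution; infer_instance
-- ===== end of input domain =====

-- B sorts first and exploits the order: max even = first even scanning the sorted list from the right, negative odds counted in the negative prefix with an early break (objective: alternative algorithm).

-- ===== PORT A =====
def solution (array : List Int) : Int × Int :=
  match PySem.List.min? array (fun x => x) with
  | none => (0, 0)  -- Python: min([]) raises ValueError; excluded by Pre_solution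
  | some m =>
    array.foldl (fun (st : Int × Int) i =>
      let st1 := if PySem.Int.mod i 2 = 0 ∧ i > st.1 then (i, st.2) else st
      if PySem.Int.mod i 2 = 1 ∧ i < 0 then (st1.1, st1.2 + 1) else st1) (m, 0)

-- ===== PORT B =====
-- 'for v in reversed(s): if v % 2 == 0: (if v > maximum: maximum = v); break'
def findEvenMax : List Int → Int → Int
  | [], m => m
  | v :: t, m => if PySem.Int.mod v 2 = 0 then (if v > m then v else m) else findEvenMax t m

-- 'for v in s: if v >= 0: break; if v % 2 == 1: odd_count += 1'
def countNegOdds : List Int → Int → Int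
  | [], c => c
  | v :: t, c => if v ≥ 0 then c else countNegOdds t (if PySem.Int.mod v 2 = 1 then c + 1 else c)

def solution_alt (array : List Int) : Int × Int :=
  let s := PySem.List.sorted array (fun x => x) false
  match s with
  | [] => (0, 0)  -- Python: s[0] raises IndexError; excluded by Pre_solution
  | m :: _ => (findEvenMax s.reverse m, countNegOdds s 0)

-- ===== PRECONDITION & SPEC =====
-- Pre_ excludes only the empty list, on which Python's min raises ValueError.
def Pre_solution (array : List Int) : Prop := array ≠ []
instance (array : List Int) : Decidable (Pre_solution array) := by unfold Pre_solution; infer_instance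
def pvWitness_solution : List Int := ([1, -4, 7])
def Spec_solution (array : List Int) (out : Int × Int) : Prop := out = solution_alt array
instance (array : List Int) (out : Int × Int) : Decidable (Spec_solution array out) := by unfold Spec_solution; infer_instance

-- ===== CLAIM =====
def Claim_equal_solution : Prop := ∀ (array : List Int), Dom_solution array → Pre_solution array → Spec_solution array (solution array)

-- ===== LEMMAS AND PROOFS =====

-- one step of A's fused loop, with the two accumulator updates separated
theorem step_eq (a c x : Int) :
    (let st1 := if PySem.Int.mod x 2 = 0 ∧ x > a then (x, c) else (a, c)
     if PySem.Int.mod x 2 = 1 ∧ x < 0 then (st1.1, st1.2 + 1) else st1)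
    = ((if PySem.Int.mod x 2 = 0 ∧ x > a then x else a),
       (if PySem.Int.mod x 2 = 1 ∧ x < 0 then c + 1 else c)) := by
  dsimp only []
  split_ifs <;> rfl

-- A's fused loop splits into an independent running-max pass and a count pass.
theorem loop_split (xs : List Int) (a c : Int) :
    xs.foldl (fun (st : Int × Int) i =>
      let st1 := if PySem.Int.mod i 2 = 0 ∧ i > st.1 then (i, st.2) else st
      if PySem.Int.mod i 2 = 1 ∧ i < 0 then (st1.1, st1.2 + 1) else st1) (a, c)
    = (xs.foldl (fun a i => if PySem.Int.mod i 2 = 0 ∧ i > a then i else a) a,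
       c + (xs.filter (fun i => decide (i < 0) && (PySem.Int.mod i 2 == 1))).length) := by
  induction xs generalizing a c with
  | nil => simp
  | cons x t ih =>
    rw [List.foldl_cons, List.foldl_cons, List.filter_cons]
    have hstep := step_eq a c x
    dsimp only [] at hstep ⊢
    rw [hstep, ih]
    by_cases h2 : PySem.Int.mod x 2 = 1 ∧ x < 0
    · have hb : (decide (x < 0) && (PySem.Int.mod x 2 == 1)) = true := by
        rw [Bool.and_eq_true, decide_eq_true_eq, beq_iff_eq]
        exact ⟨h2.2, h2.1⟩
      rw [if_pos h2, if_pos hb]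
      refine Prod.ext rfl ?_
      show c + 1 + ((t.filter _).length : Int) = c + (((t.filter _).length + 1 : Nat) : Int)
      push_cast
      ring
    · have hb : ¬ (decide (x < 0) && (PySem.Int.mod x 2 == 1)) = true := by
        rw [Bool.and_eq_true, decide_eq_true_eq, beq_iff_eq]
        intro ⟨hx, hm⟩
        exact h2 ⟨hm, hx⟩
      rw [if_neg h2, if_neg hb]

-- the conditional-max pass equals the running max over the filtered evens
theorem maxpass_filter (xs : List Int) (a : Int) :
    xs.foldl (fun a i => if PySem.Int.mod i 2 = 0 ∧ i > a then i else a) a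
    = (xs.filter (fun i => PySem.Int.mod i 2 == 0)).foldl max a := by
  induction xs generalizing a with
  | nil => rfl
  | cons x t ih =>
    rw [List.foldl_cons, List.filter_cons]
    by_cases h : PySem.Int.mod x 2 = 0
    · have hb : (PySem.Int.mod x 2 == 0) = true := beq_iff_eq.mpr h
      rw [if_pos hb, List.foldl_cons]
      have hx : (if PySem.Int.mod x 2 = 0 ∧ x > a then x else a) = max a x := by
        by_cases hgt : x > a
        · rw [if_pos ⟨h, hgt⟩, max_eq_right (le_of_lt hgt)]
        · rw [if_neg (fun hc => hgt hc.2), max_eq_left (not_lt.mp hgt)]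
      rw [hx, ih]
    · have hb : ¬ (PySem.Int.mod x 2 == 0) = true := fun hc => h (beq_iff_eq.mp hc)
      have hx : (if PySem.Int.mod x 2 = 0 ∧ x > a then x else a) = a :=
        if_neg (fun hc => h hc.1)
      rw [if_neg hb, hx, ih]

-- B's right-to-left early-exit scan picks the head of the filtered evens
theorem findEvenMax_eq (l : List Int) (m : Int) :
    findEvenMax l m
    = match (l.filter (fun v => PySem.Int.mod v 2 == 0)).head? with
      | none => m
      | some v => max m v := by
  induction l with
  | nil => rfl
  | cons x t ih =>
    rw [findEvenMax, List.filter_cons]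
    by_cases h : PySem.Int.mod x 2 = 0
    · have hb : (PySem.Int.mod x 2 == 0) = true := beq_iff_eq.mpr h
      rw [if_pos h, if_pos hb, List.head?_cons]
      by_cases hgt : x > m
      · rw [if_pos hgt]; exact (max_eq_right (le_of_lt hgt)).symm
      · rw [if_neg hgt]; exact (max_eq_left (not_lt.mp hgt)).symm
    · have hb : ¬ (PySem.Int.mod x 2 == 0) = true := fun hc => h (beq_iff_eq.mp hc)
      rw [if_neg h, if_neg hb, ih]

-- running max over an ascending list is max of the seed and the last element
theorem foldl_max_sorted (l : List Int) (m : Int) (hs : l.Pairwise (· ≤ ·)) :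
    l.foldl max m
    = match l.getLast? with
      | none => m
      | some v => max m v := by
  induction l generalizing m with
  | nil => rfl
  | cons x t ih =>
    rw [List.foldl_cons]
    cases t with
    | nil => simp
    | cons y u =>
      have hs' := (List.pairwise_cons.mp hs)
      rw [ih (max m x) hs'.2, List.getLast?_cons_cons]
      cases hL : (y :: u).getLast? with
      | none => simp at hL
      | some L =>
        have hmem : L ∈ y :: u := List.mem_of_getLast? hL
        have hxL : x ≤ L := hs'.1 L hmem
        dsimp only []
        rw [max_assoc, max_eq_right hxL]

-- B's early-break count over an ascending list counts all negative odds
theorem countNegOdds_sorted (l : List Int) (c : Int) (hs : l.Pairwise (· ≤ ·)) :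
    countNegOdds l c
    = c + ((l.filter (fun i => decide (i < 0) && (PySem.Int.mod i 2 == 1))).length : Int) := by
  induction l generalizing c with
  | nil => simp [countNegOdds]
  | cons x t ih =>
    have hs' := List.pairwise_cons.mp hs
    rw [countNegOdds, List.filter_cons]
    by_cases h0 : x ≥ 0
    · have hft : t.filter (fun i => decide (i < 0) && (PySem.Int.mod i 2 == 1)) = [] := by
        rw [List.filter_eq_nil_iff]
        intro y hy
        have : x ≤ y := hs'.1 y hy
        simp only [Bool.and_eq_true, decide_eq_true_eq, not_and]
        intro hneg
        omega
      have hfx : ¬ (decide (x < 0) && (PySem.Int.mod x 2 == 1)) = true := by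
        rw [Bool.and_eq_true, decide_eq_true_eq]
        intro hc
        omega
      rw [if_pos h0, if_neg hfx, hft]
      simp
    · have hneg : x < 0 := by omega
      rw [if_neg h0]
      by_cases hodd : PySem.Int.mod x 2 = 1
      · have hb : (decide (x < 0) && (PySem.Int.mod x 2 == 1)) = true := by
          rw [Bool.and_eq_true, decide_eq_true_eq, beq_iff_eq]
          exact ⟨hneg, hodd⟩
        rw [if_pos hodd, if_pos hb, ih _ hs'.2]
        simp only [List.length_cons]
        push_cast
        ring
      · have hb : ¬ (decide (x < 0) && (PySem.Int.mod x 2 == 1)) = true := by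
          rw [Bool.and_eq_true, decide_eq_true_eq, beq_iff_eq]
          exact fun hc => hodd hc.2
        rw [if_neg hodd, if_neg hb, ih _ hs'.2]

-- ===== VERDICT =====
theorem solution_spec : Claim_equal_solution := by
  intro array _ hpre
  unfold Spec_solution solution solution_alt
  cases hmin : PySem.List.min? array (fun x => x) with
  | none =>
    exact absurd (by simpa using (PySem.List.min?_eq_none_iff (xs := array) (key := fun x => x)).mp hmin) hpre
  | some m0 =>
    cases hs : PySem.List.sorted array (fun x => x) false with
    | nil =>
      exact absurd ((PySem.List.sorted_eq_nil_iff _ _ _).mp hs) hpre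
    | cons m t =>
      dsimp only []
      -- the head of the sorted list is the minimum
      have hperm : (PySem.List.sorted array (fun x => x) false).Perm array :=
        PySem.List.sorted_perm ..
      have hmemm : m ∈ array := hperm.mem_iff.mp (hs ▸ List.mem_cons_self ..)
      have hm0mem : m0 ∈ array := PySem.List.min?_mem hmin
      have hle1 : m0 ≤ m := PySem.List.min?_isMin hmin m hmemm
      have hle2 : m ≤ m0 := PySem.List.key_head_sorted_le (xs := array) (key := fun x => x) hs m0 hm0mem
      have hm : m0 = m := le_antisymm hle1 hle2
      subst hm
      rw [loop_split, maxpass_filter, zero_add]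
      have hpair : (m0 :: t).Pairwise (fun a b => (a : Int) ≤ b) := by
        have := PySem.List.sorted_pairwise (xs := array) (key := fun (x : Int) => x) 
        rw [hs] at this
        exact this
      -- count component: filters of permuted lists have equal length
      have hcount : (array.filter (fun i => decide (i < 0) && (PySem.Int.mod i 2 == 1))).length
          = ((m0 :: t).filter (fun i => decide (i < 0) && (PySem.Int.mod i 2 == 1))).length := by
        exact ((hs ▸ hperm).symm.filter _).length_eq
      -- max component: running max over permuted filtered evens
      have hmax : (array.filter (fun i => PySem.Int.mod i 2 == 0)).foldl max m0
          = ((m0 :: t).filter (fun i => PySem.Int.mod i 2 == 0)).foldl max m0 := by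
        exact ((hs ▸ hperm).symm.filter _).foldl_eq' (fun x _ y _ a => max_right_comm a x y) m0
      rw [hmax, hcount, findEvenMax_eq, countNegOdds_sorted _ _ hpair,
          foldl_max_sorted _ _ (List.Pairwise.filter _ hpair),
          List.filter_reverse, List.head?_reverse, zero_add]
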